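-- pv_equiv track=rewrite | github.com/sherwyn33/fuzzy-potato | JavaImpl/create_java_impl.py | create_question_marks
-- ===== SOURCE A (Python) =====
-- def create_question_marks(count: int) -> str:
--     string = "?"
--     max_char = 120
--     i = 0
--     for x in range(count - 1):
--         i = i + 2
--         string = string + ", ?"
--         if i > max_char:
--             string = string + "/n"
--     return string
-- ===== SOURCE B (Python) =====
-- def create_question_marks(count: int) -> str:
--     m = max(0, count - 1)
--     return "?" + ", ?" * min(m, 60) + ", ?/n" * max(0, m - 60)
-- ===== Notes on version B (the rewrite author's own statement) =====
-- stated objective: simpler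
-- what changed: Replaced the loop of repeated concatenations by a closed-form string: the '/n' suffix is appended exactly for the iterations past the 60th, so the result is '?' + ', ?'*min(m,60) + ', ?/n'*max(0,m-60) with m = max(0,count-1).
import Mathlib
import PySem

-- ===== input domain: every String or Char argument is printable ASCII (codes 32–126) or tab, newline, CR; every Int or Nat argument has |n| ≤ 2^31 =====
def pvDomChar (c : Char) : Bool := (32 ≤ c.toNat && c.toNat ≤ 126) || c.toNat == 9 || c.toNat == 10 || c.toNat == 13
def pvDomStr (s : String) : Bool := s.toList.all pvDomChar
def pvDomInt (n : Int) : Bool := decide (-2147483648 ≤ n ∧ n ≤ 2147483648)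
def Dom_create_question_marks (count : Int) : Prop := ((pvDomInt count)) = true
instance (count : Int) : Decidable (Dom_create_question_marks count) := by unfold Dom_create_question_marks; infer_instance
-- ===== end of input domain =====

-- B replaces A's quadratic loop of concatenations by a closed-form string built from
-- repetition counts (objective: simpler); return values agree for every count.

-- ===== PORT A =====
-- loop body of A (i, string are the loop state; the range variable is unused)
def cqmStep (st : Int × String) (_x : Int) : Int × String :=
  let i := st.1 + 2
  let s := st.2 ++ ", ?"
  if i > 120 then (i, s ++ "/n") else (i, s)

def create_question_marks (count : Int) : String :=
  ((PySem.List.pyRange 0 (count - 1) 1).foldl cqmStep (0, "?")).2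

-- ===== PORT B =====
-- Python 's * n' (string repetition, empty for n ≤ 0)
def repStr (n : Nat) (s : String) : String :=
  match n with
  | 0 => ""
  | k + 1 => s ++ repStr k s

def create_question_marks_alt (count : Int) : String :=
  let m := max 0 (count - 1)
  "?" ++ repStr (min m 60).toNat ", ?" ++ repStr (max 0 (m - 60)).toNat ", ?/n"

-- ===== PRECONDITION & SPEC =====
def Spec_create_question_marks (count : Int) (out : String) : Prop := out = create_question_marks_alt count
instance (count : Int) (out : String) : Decidable (Spec_create_question_marks count out) := by unfold Spec_create_question_marks; infer_instance

-- ===== CLAIM (what is proved, stated in full; the proofs are below) =====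
def Claim_equal_create_question_marks : Prop := ∀ (count : Int), Dom_create_question_marks count → Spec_create_question_marks count (create_question_marks count)

-- ===== LEMMAS AND PROOFS =====

-- the loop state's string after j iterations
def cqmG (j : Nat) : String := "?" ++ repStr (min j 60) ", ?" ++ repStr (j - 60) ", ?/n"

theorem repStr_comm (n : Nat) (s : String) : repStr n s ++ s = s ++ repStr n s := by
  induction n with
  | zero => simp [repStr]
  | succ k ih =>
      have h : repStr (k + 1) s = s ++ repStr k s := rfl
      rw [h, String.append_assoc, ih]

theorem repStr_succ_right (n : Nat) (s : String) : repStr (n + 1) s = repStr n s ++ s := by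
  have h : repStr (n + 1) s = s ++ repStr n s := rfl
  rw [h, ← repStr_comm]

theorem cqmStep_state (j : Nat) (x : Int) :
    cqmStep (2 * (j : Int), cqmG j) x = (2 * ((j : Int) + 1), cqmG (j + 1)) := by
  unfold cqmStep cqmG
  by_cases h : j < 60
  · have h1 : ¬ (2 * (j : Int) + 2 > 120) := by omega
    have h2 : min j 60 = j := by omega
    have h3 : min (j + 1) 60 = j + 1 := by omega
    have h4 : j - 60 = 0 := by omega
    have h5 : j + 1 - 60 = 0 := by omega
    simp only [if_neg h1, h2, h3, h4, h5, Prod.mk.injEq]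
    refine ⟨by ring, ?_⟩
    rw [repStr_succ_right]
    simp [repStr, String.append_assoc]
  · have h1 : (2 * (j : Int) + 2 > 120) := by omega
    have h2 : min j 60 = 60 := by omega
    have h3 : min (j + 1) 60 = 60 := by omega
    have h4 : j + 1 - 60 = (j - 60) + 1 := by omega
    simp only [if_pos h1, h2, h3, h4, Prod.mk.injEq]
    refine ⟨by ring, ?_⟩
    have hlit : (", ?/n" : String) = ", ?" ++ "/n" := by decide
    rw [hlit, repStr_succ_right]
    simp [String.append_assoc]
    rw [repStr_succ_right]

theorem cqm_foldl (l : List Int) (j : Nat) :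
    l.foldl cqmStep (2 * (j : Int), cqmG j) = (2 * ((j : Int) + l.length), cqmG (j + l.length)) := by
  induction l generalizing j with
  | nil => simp
  | cons a t ih =>
      rw [List.foldl_cons, cqmStep_state j a]
      have h := ih (j + 1)
      push_cast at h
      rw [h, Prod.mk.injEq]
      refine ⟨by simp only [List.length_cons]; push_cast; ring, by congr 1; simp; omega⟩

theorem create_question_marks_spec : Claim_equal_create_question_marks := by
  intro count _
  unfold Spec_create_question_marks create_question_marks create_question_marks_alt
  set n := (count - 1).toNat with hn
  have hst : ((0 : Int), ("?" : String)) = (2 * ((0 : Nat) : Int), cqmG 0) := by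
    simp [cqmG, repStr]
  rw [hst, cqm_foldl]
  have hlen : (PySem.List.pyRange 0 (count - 1) 1).length = n := by
    rw [PySem.List.length_pyRange_one]; omega
  rw [hlen]
  simp only [cqmG]
  have e1 : min (0 + n) 60 = (min (max 0 (count - 1)) 60).toNat := by omega
  have e2 : (0 + n) - 60 = (max 0 (max 0 (count - 1) - 60)).toNat := by omega
  rw [e1, e2]
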